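-- pv_equiv track=rewrite | github.com/hoangnv2810/Python_CodePTIT | DanhSach/SoLocPhatDep.py | check
-- ===== SOURCE A (Python) =====
-- def check(num):
--     if num.count("6") + num.count("8") != len(num):
--         return False
--     if num[0] == "8":
--         return False
--     for i in range(len(num)):
--         if num[i] == "8" and num[i-1] != "6" and num[i-1] != "8":
--             return False
--         if num[i] == "8" and num[i-1] == "8" and num[i-2] != "6" and i > 1:
--             return False
--     return True
-- ===== SOURCE B (Python) =====
-- def check(num):
--     if num[0] != '6':
--         return False
--     run = 0
--     for ch in num:
--         if ch == '6':
--             run = 0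
--         elif ch == '8':
--             run += 1
--             if run > 2:
--                 return False
--         else:
--             return False
--     return True
-- ===== Notes on version B (the rewrite author's own statement) =====
-- stated objective: simpler
-- what changed: Replaced A's two count() passes plus an indexed loop with negative-index look-backs (num[i-1], num[i-2]) by a single forward pass holding a run-length counter for consecutive '8's, rejecting any non-6/8 character and any run longer than two; Pre_ excludes the empty string, on which both A and B raise IndexError at num[0].
import Mathlib
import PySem

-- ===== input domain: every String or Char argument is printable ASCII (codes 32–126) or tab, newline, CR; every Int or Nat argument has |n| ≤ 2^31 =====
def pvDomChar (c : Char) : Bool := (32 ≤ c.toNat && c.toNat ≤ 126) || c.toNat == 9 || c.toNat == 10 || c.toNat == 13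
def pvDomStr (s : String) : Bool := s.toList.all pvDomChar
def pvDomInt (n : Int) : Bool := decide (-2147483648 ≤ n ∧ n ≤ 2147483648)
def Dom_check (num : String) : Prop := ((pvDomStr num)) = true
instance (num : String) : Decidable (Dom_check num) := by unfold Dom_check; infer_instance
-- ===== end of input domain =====

-- B replaces A's count() pre-pass and indexed look-back loop by one forward pass with a run counter (objective: simpler).

-- ===== PORT A =====
-- the 'for i in range(len(num))' loop with its two early-return tests
def checkLoopA (num : String) : List Int → Bool
  | [] => true
  | i :: rest =>
      if PySem.Str.pyGet? num i == some '8' && !(PySem.Str.pyGet? num (i-1) == some '6')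
          && !(PySem.Str.pyGet? num (i-1) == some '8') then false
      else if PySem.Str.pyGet? num i == some '8' && PySem.Str.pyGet? num (i-1) == some '8'
          && !(PySem.Str.pyGet? num (i-2) == some '6') && decide (1 < i) then false
      else checkLoopA num rest

def check (num : String) : Bool :=
  if ((PySem.Str.count num "6" : Int) + (PySem.Str.count num "8" : Int)) ≠ PySem.Str.len num then false
  else if PySem.Str.pyGet? num 0 == some '8' then false
  else checkLoopA num (PySem.List.pyRange 0 (PySem.Str.len num) 1)

-- ===== PORT B =====
-- single pass, 'run' = length of the current run of '8's
def altLoop : List Char → Int → Bool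
  | [], _ => true
  | c :: rest, run =>
      if c == '6' then altLoop rest 0
      else if c == '8' then
        if 2 < run + 1 then false else altLoop rest (run + 1)
      else false

def check_alt (num : String) : Bool :=
  if !(PySem.Str.pyGet? num 0 == some '6') then false
  else altLoop num.toList 0

-- ===== PRECONDITION & SPEC =====
-- Pre_ excludes only the empty string: both A and B evaluate num[0] there and raise IndexError.
def Pre_check (num : String) : Prop := num ≠ ""
instance (num : String) : Decidable (Pre_check num) := by unfold Pre_check; infer_instance
def pvWitness_check : String := "6886"

def Spec_check (num : String) (out : Bool) : Prop := out = check_alt num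
instance (num : String) (out : Bool) : Decidable (Spec_check num out) := by unfold Spec_check; infer_instance

-- ===== CLAIM (what is proved, stated in full; the proofs are below) =====
def Claim_equal_check : Prop := ∀ (num : String), Dom_check num → Pre_check num → Spec_check num (check num)

-- ===== LEMMAS AND PROOFS =====

-- proof-side characterisations
def all68 (l : List Char) : Bool := l.all (fun c => c == '6' || c == '8')

def noT : List Char → Bool
  | a :: b :: c :: r => if a == '8' && b == '8' && c == '8' then false else noT (b :: c :: r)
  | _ => true

theorem count_go_singleton (c : Char) : ∀ (fuel : Nat) (t : List Char) (acc : Nat),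
    t.length ≤ fuel → PySem.Chars.count.go [c] fuel t acc = acc + t.count c := by
  intro fuel
  induction fuel with
  | zero =>
    intro t acc h
    have ht : t = [] := List.eq_nil_of_length_eq_zero (Nat.le_zero.mp h)
    subst ht; simp [PySem.Chars.count.go]
  | succ n ih =>
    intro t acc h
    cases t with
    | nil => simp [PySem.Chars.count.go]
    | cons x t' =>
      by_cases hc : c = x
      · subst hc
        simp only [PySem.Chars.count.go, List.isPrefixOf, beq_self_eq_true, Bool.true_and,
          if_true, List.length_cons, List.drop_succ_cons,
          List.length_nil, List.drop_zero]
        rw [ih t' (acc + 1) (by simpa using h)]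
        simp
        omega
      · simp only [PySem.Chars.count.go, List.isPrefixOf]
        rw [if_neg (by simp [hc])]
        rw [ih t' acc (by simpa using h)]
        simp [List.count_cons]
        exact fun h' => hc h'.symm

theorem count_singleton (c : Char) (l : List Char) :
    PySem.Chars.count l [c] = l.count c := by
  have := count_go_singleton c l.length l 0 le_rfl
  simpa [PySem.Chars.count] using this

theorem counts_le (l : List Char) : l.count '6' + l.count '8' ≤ l.length := by
  induction l with
  | nil => simp
  | cons a r ih =>
    simp only [List.count_cons, List.length_cons]
    by_cases h6 : a = '6' <;> by_cases h8 : a = '8' <;>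
      simp_all <;> omega

theorem counts_eq_iff (l : List Char) :
    (l.count '6' + l.count '8' = l.length) ↔ all68 l = true := by
  induction l with
  | nil => simp [all68]
  | cons a r ih =>
    have hle := counts_le r
    simp only [all68, List.all_cons, List.length_cons] at *
    by_cases h6 : a = '6'
    · subst h6
      rw [List.count_cons_self, List.count_cons_of_ne (by decide : ('6' : Char) ≠ '8')]
      rw [show ((('6' : Char) == '6') || (('6' : Char) == '8')) = true from by decide,
        Bool.true_and]
      rw [← ih]; omega
    · by_cases h8 : a = '8'
      · subst h8
        rw [List.count_cons_self, List.count_cons_of_ne (by decide : ('8' : Char) ≠ '6')]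
        rw [show ((('8' : Char) == '6') || (('8' : Char) == '8')) = true from by decide,
          Bool.true_and]
        rw [← ih]; omega
      · rw [List.count_cons_of_ne h6, List.count_cons_of_ne h8]
        rw [show ((a == '6') || (a == '8')) = false from by simp [h6, h8], Bool.false_and]
        constructor
        · intro h; exfalso; omega
        · intro h; simp at h

theorem all68_iff_counts (l : List Char) :
    ((l.count '6' : Int) + (l.count '8' : Int) = (l.length : Int)) ↔ all68 l = true := by
  rw [← counts_eq_iff]
  constructor <;> intro h <;> [exact_mod_cast h; exact_mod_cast h]

theorem noT_cons_of_ne {c : Char} (h : ¬ c = '8') (r : List Char) :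
    noT (c :: r) = noT r := by
  match r with
  | [] => simp [noT]
  | [b] => simp [noT]
  | b :: d :: r' => simp [noT, h]

theorem noT_cons_cons_of_ne {b : Char} (a : Char) (h : ¬ b = '8') (r : List Char) :
    noT (a :: b :: r) = noT r := by
  match r with
  | [] => simp [noT]
  | d :: r' =>
    rw [show noT (a :: b :: d :: r') = noT (b :: d :: r') by simp [noT, h]]
    exact noT_cons_of_ne h (d :: r')

theorem noT_step {a b d : Char} (r' : List Char) (htr : ¬(a = '8' ∧ b = '8' ∧ d = '8')) :
    noT (a :: b :: d :: r') = noT (b :: d :: r') := by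
  have hcond : ((a == '8') && (b == '8') && (d == '8')) = false := by
    by_contra hb
    simp only [Bool.not_eq_false, Bool.and_eq_true, beq_iff_eq] at hb
    exact htr ⟨hb.1.1, hb.1.2, hb.2⟩
  simp [noT, hcond]

theorem noT_triple (a b d : Char) (r' : List Char)
    (h : a = '8' ∧ b = '8' ∧ d = '8') :
    noT (a :: b :: d :: r') = false := by
  rcases h with ⟨h1, h2, h3⟩; subst h1; subst h2; subst h3
  simp [noT]

theorem altLoop_eq (l : List Char) : ∀ run : Int, 0 ≤ run → run ≤ 2 →
    altLoop l run = (all68 l && noT (List.replicate run.toNat '8' ++ l)) := by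
  induction l with
  | nil =>
    intro run h0 h2
    have hk : run.toNat = 0 ∨ run.toNat = 1 ∨ run.toNat = 2 := by omega
    rcases hk with hk | hk | hk <;> rw [hk] <;> simp [altLoop, all68, noT]
  | cons c rest ih =>
    intro run h0 h2
    by_cases h6 : c = '6'
    · subst h6
      rw [show altLoop ('6' :: rest) run = altLoop rest 0 from by simp [altLoop]]
      rw [ih 0 le_rfl (by norm_num)]
      have hnT : noT (List.replicate run.toNat '8' ++ '6' :: rest) = noT rest := by
        have hk : run.toNat = 0 ∨ run.toNat = 1 ∨ run.toNat = 2 := by omega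
        rcases hk with hk | hk | hk <;> rw [hk]
        · show noT ('6' :: rest) = noT rest
          exact noT_cons_of_ne (by decide) rest
        · show noT ('8' :: '6' :: rest) = noT rest
          exact noT_cons_cons_of_ne _ (by decide) rest
        · show noT ('8' :: '8' :: '6' :: rest) = noT rest
          rw [noT_step rest (by decide)]
          exact noT_cons_cons_of_ne _ (by decide) rest
      rw [hnT]
      have : all68 ('6' :: rest) = all68 rest := by simp [all68]
      rw [this]
      simp
    · by_cases h8 : c = '8'
      · subst h8
        by_cases hr : run = 2
        · subst hr
          rw [show altLoop ('8' :: rest) 2 = false from by simp [altLoop]]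
          rw [show List.replicate (2 : Int).toNat '8' ++ '8' :: rest
              = '8' :: '8' :: '8' :: rest from rfl]
          rw [noT_triple _ _ _ _ ⟨rfl, rfl, rfl⟩]
          simp
        · rw [show altLoop ('8' :: rest) run
              = if 2 < run + 1 then false else altLoop rest (run + 1) from by simp [altLoop]]
          rw [if_neg (by omega)]
          rw [ih (run + 1) (by omega) (by omega)]
          have hrep : List.replicate (run + 1).toNat '8' ++ rest
              = List.replicate run.toNat '8' ++ '8' :: rest := by
            have h1 : (run + 1).toNat = run.toNat + 1 := by omega
            rw [h1, List.replicate_succ']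
            simp
          rw [hrep]
          have : all68 ('8' :: rest) = all68 rest := by simp [all68]
          rw [this]
      · rw [show altLoop (c :: rest) run = false from by simp [altLoop, h6, h8]]
        have : all68 (c :: rest) = false := by simp [all68, h6, h8]
        simp [this]

theorem noT_iff (l : List Char) :
    noT l = true ↔ ∀ j : Nat, ¬(l[j]? = some '8' ∧ l[j+1]? = some '8' ∧ l[j+2]? = some '8') := by
  induction l with
  | nil => simp [noT]
  | cons a r ih =>
    match r, ih with
    | [], _ =>
      constructor
      · intro _ j h
        rcases h with ⟨-, h2, -⟩
        cases j <;> simp at h2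
      · intro _; simp [noT]
    | [b], _ =>
      constructor
      · intro _ j h
        rcases h with ⟨-, -, h3⟩
        cases j <;> simp at h3
      · intro _; simp [noT]
    | b :: d :: r', ih =>
      by_cases htr : a = '8' ∧ b = '8' ∧ d = '8'
      · rw [noT_triple _ _ _ _ htr]
        constructor
        · intro h; exact absurd h (by simp)
        · intro H; exfalso
          exact H 0 (by simp [htr.1, htr.2.1, htr.2.2])
      · rw [noT_step r' htr, ih]
        constructor
        · intro H j hj
          cases j with
          | zero =>
            simp only [List.getElem?_cons_zero, List.getElem?_cons_succ, Option.some_inj] at hj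
            exact htr ⟨hj.1, hj.2.1, hj.2.2⟩
          | succ j' =>
            simp only [List.getElem?_cons_succ] at hj
            exact H j' hj
        · intro H j hj
          refine H (j + 1) ?_
          simpa [List.getElem?_cons_succ] using hj

theorem checkLoopA_eq_all (num : String) (is : List Int) :
    checkLoopA num is =
      is.all (fun i =>
        !((PySem.Str.pyGet? num i == some '8' && !(PySem.Str.pyGet? num (i-1) == some '6')
             && !(PySem.Str.pyGet? num (i-1) == some '8'))
          || (PySem.Str.pyGet? num i == some '8' && PySem.Str.pyGet? num (i-1) == some '8'
             && !(PySem.Str.pyGet? num (i-2) == some '6') && decide (1 < i)))) := by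
  induction is with
  | nil => simp [checkLoopA]
  | cons i rest ih =>
    simp only [checkLoopA, List.all_cons]
    split_ifs with h1 h2
    · rw [h1, Bool.true_or, Bool.not_true, Bool.false_and]
    · simp only [Bool.not_eq_true] at h1
      rw [h1, h2, Bool.false_or, Bool.not_true, Bool.false_and]
    · simp only [Bool.not_eq_true] at h1 h2
      rw [h1, h2, Bool.or_self, Bool.not_false, Bool.true_and]
      exact ih

theorem mem68 {l : List Char} (hall : all68 l = true) : ∀ c ∈ l, c = '6' ∨ c = '8' := by
  intro c hc
  have := List.all_eq_true.mp ((by simpa [all68] using hall : l.all (fun c => c == '6' || c == '8') = true)) c hc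
  rcases Bool.or_eq_true_iff.mp this with h | h
  · exact Or.inl (by simpa using h)
  · exact Or.inr (by simpa using h)

theorem strGet_some (num : String) (i : Int)
    (h1 : -(num.toList.length : Int) ≤ i) (h2 : i < (num.toList.length : Int)) :
    ∃ c, PySem.Str.pyGet? num i = some c ∧ c ∈ num.toList := by
  have he : PySem.Str.pyGet? num i = PySem.List.pyGet? num.toList i := by simp
  rw [he]
  cases hp : PySem.List.pyGet? num.toList i with
  | none =>
    exfalso
    rw [PySem.List.pyGet?_eq_none_iff] at hp
    exact hp ⟨h1, h2⟩
  | some c => exact ⟨c, rfl, PySem.List.mem_of_pyGet?_eq_some _ hp⟩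

theorem loopA_eq_noT (num : String) (hall : all68 num.toList = true)
    (hne : num.toList ≠ []) :
    checkLoopA num (PySem.List.pyRange 0 (PySem.Str.len num) 1) = noT num.toList := by
  have hlen : 0 < num.toList.length := List.length_pos_iff.mpr hne
  rw [checkLoopA_eq_all, Bool.eq_iff_iff, List.all_eq_true, noT_iff]
  constructor
  · intro H j hj
    rcases hj with ⟨hj1, hj2, hj3⟩
    have hjlen : j + 2 < num.toList.length := by
      by_contra hc
      rw [List.getElem?_eq_none (by omega)] at hj3
      exact Option.some_ne_none _ hj3.symm
    have hi : ((j : Int) + 2) ∈ PySem.List.pyRange 0 (PySem.Str.len num) 1 := by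
      rw [PySem.List.mem_pyRange_one]
      constructor
      · omega
      · rw [PySem.Str.len_eq]; omega
    have hH := H _ hi
    simp only [Bool.not_eq_true', Bool.or_eq_false_iff] at hH
    rcases hH with ⟨-, hb2⟩
    have e0 : PySem.Str.pyGet? num ((j : Int) + 2) = some '8' := by
      rw [PySem.Str.pyGet?_eq, PySem.Chars.pyGet?_eq_listPyGet?,
        show ((j : Int) + 2) = ((j + 2 : Nat) : Int) from by push_cast; ring_nf,
        PySem.List.pyGet?_natCast]
      exact hj3
    have e1 : PySem.Str.pyGet? num ((j : Int) + 2 - 1) = some '8' := by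
      rw [PySem.Str.pyGet?_eq, PySem.Chars.pyGet?_eq_listPyGet?,
        show ((j : Int) + 2 - 1) = ((j + 1 : Nat) : Int) from by push_cast; ring,
        PySem.List.pyGet?_natCast]
      exact hj2
    have e2 : PySem.Str.pyGet? num ((j : Int) + 2 - 2) = some '8' := by
      rw [PySem.Str.pyGet?_eq, PySem.Chars.pyGet?_eq_listPyGet?,
        show ((j : Int) + 2 - 2) = ((j : Nat) : Int) from by ring,
        PySem.List.pyGet?_natCast]
      exact hj1
    rw [e0, e1, e2] at hb2
    simp at hb2
    omega
  · intro H i hi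
    rw [PySem.List.mem_pyRange_one] at hi
    obtain ⟨hi0, hin⟩ := hi
    rw [PySem.Str.len_eq] at hin
    obtain ⟨x, hx, hxm⟩ := strGet_some num (i - 1) (by omega) (by omega)
    obtain ⟨y, hy, hym⟩ := strGet_some num i (by omega) (by omega)
    have hb1 : (PySem.Str.pyGet? num i == some '8' && !(PySem.Str.pyGet? num (i-1) == some '6')
        && !(PySem.Str.pyGet? num (i-1) == some '8')) = false := by
      rw [hx]
      rcases mem68 hall x hxm with h | h <;> subst h <;> simp
    have hb2 : (PySem.Str.pyGet? num i == some '8' && PySem.Str.pyGet? num (i-1) == some '8'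
        && !(PySem.Str.pyGet? num (i-2) == some '6') && decide (1 < i)) = false := by
      by_cases h1i : 1 < i
      · obtain ⟨z, hz, hzm⟩ := strGet_some num (i - 2) (by omega) (by omega)
        rcases mem68 hall z hzm with h | h
        · subst h; rw [hz]; simp
        · subst h
          by_cases hy8 : y = '8'
          · by_cases hx8 : x = '8'
            · exfalso
              apply H (i - 2).toNat
              refine ⟨?_, ?_, ?_⟩
              · rw [← PySem.List.pyGet?_natCast, show (((i - 2).toNat : Nat) : Int) = i - 2 from by omega,
                  ← PySem.Chars.pyGet?_eq_listPyGet?, ← PySem.Str.pyGet?_eq]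
                exact hz
              · rw [← PySem.List.pyGet?_natCast, show (((i - 2).toNat + 1 : Nat) : Int) = i - 1 from by omega,
                  ← PySem.Chars.pyGet?_eq_listPyGet?, ← PySem.Str.pyGet?_eq]
                rw [hx, hx8]
              · rw [← PySem.List.pyGet?_natCast, show (((i - 2).toNat + 2 : Nat) : Int) = i from by omega,
                  ← PySem.Chars.pyGet?_eq_listPyGet?, ← PySem.Str.pyGet?_eq]
                rw [hy, hy8]
            · rw [hx]
              have : ((some x == some ('8' : Char))) = false := by simp [hx8]
              simp [this]
          · rw [hy]
            have : ((some y == some ('8' : Char))) = false := by simp [hy8]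
            simp [this]
      · rw [decide_eq_false h1i]
        simp
    simp only [hb1, hb2, Bool.or_self, Bool.not_false]

-- ===== VERDICT (by name: the statement is the Claim_ definition above) =====
theorem check_spec : Claim_equal_check := by
  intro num _ hpre
  unfold Spec_check check check_alt
  have hl : num.toList ≠ [] := by
    intro h
    exact hpre (String.toList_eq_nil_iff.mp h)
  have hlen : 0 < num.toList.length := List.length_pos_iff.mpr hl
  have hcnt : (((PySem.Str.count num "6" : Int) + (PySem.Str.count num "8" : Int)) = PySem.Str.len num)
      ↔ all68 num.toList = true := by
    rw [PySem.Str.count_eq, PySem.Str.count_eq, PySem.Str.len_eq]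
    rw [show ("6" : String).toList = ['6'] from rfl, show ("8" : String).toList = ['8'] from rfl]
    rw [count_singleton, count_singleton]
    exact all68_iff_counts _
  by_cases g1 : ((PySem.Str.count num "6" : Int) + (PySem.Str.count num "8" : Int)) = PySem.Str.len num
  · have hall : all68 num.toList = true := hcnt.mp g1
    rw [if_neg (by simpa using g1)]
    obtain ⟨c0, hc0, hc0m⟩ := strGet_some num 0 (by omega) (by exact_mod_cast hlen)
    rcases mem68 hall c0 hc0m with h6 | h8
    · -- head is '6': both sides run their loops
      rw [if_neg (by rw [hc0, h6]; simp)]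
      rw [if_neg (by rw [hc0, h6]; simp)]
      rw [loopA_eq_noT num hall hl]
      rw [altLoop_eq num.toList 0 le_rfl (by norm_num)]
      rw [show List.replicate (0 : Int).toNat '8' ++ num.toList = num.toList from rfl]
      rw [hall]
      simp
    · -- head is '8': both sides reject
      rw [if_pos (by rw [hc0, h8]; simp)]
      rw [if_pos (by rw [hc0, h8]; simp)]
  · -- some character is not '6'/'8': both sides reject
    rw [if_pos (by simpa using g1)]
    have hn68 : all68 num.toList = false := by
      rcases Bool.eq_false_or_eq_true (all68 num.toList) with h | h
      · exact absurd (hcnt.mpr h) g1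
      · exact h
    by_cases gB : (!(PySem.Str.pyGet? num 0 == some '6')) = true
    · rw [if_pos gB]
    · rw [if_neg gB]
      rw [altLoop_eq num.toList 0 le_rfl (by norm_num)]
      rw [show List.replicate (0 : Int).toNat '8' ++ num.toList = num.toList from rfl]
      rw [hn68]
      simp
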